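-- pv_equiv track=rewrite | github.com/Nandini415/PracticeProgramming | RatInMaze.py | RatMaze
-- ===== SOURCE A (Python) =====
-- def isValid(n, maze, x, y, s):
--     if x >= 0 and y >= 0 and x < n and y < n and maze[x][y] == 1 and s[x][y] == 0:
--         return True
--     return False
--
-- def RatMaze(n,maze,move_x,move_y,x,y,s):
--   if x==n-1 and y==n-1:
--     return True
--   for i in range(n):
--     x_new=x+move_x[i]
--     y_new=y+move_y[i]
--     if isValid(n,maze,x_new,y_new,s):
--       s[x_new][y_new]=1
--       if RatMaze(n,maze,move_x,move_y,x_new,y_new,s):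
--         return True
--       s[x_new][y_new]=0
--   return False
-- ===== SOURCE B (Python) =====
-- def RatMaze(n, maze, move_x, move_y, x, y, s):
--     if x == n - 1 and y == n - 1:
--         return True
--     moves = [(move_x[i], move_y[i]) for i in range(n)]
--     reach = {(x, y)}
--     frontier = [(x, y)]
--     for _ in range(n * n + 1):
--         if not frontier:
--             break
--         new = []
--         for (cx, cy) in frontier:
--             for (dx, dy) in moves:
--                 nx, ny = cx + dx, cy + dy
--                 if 0 <= nx < n and 0 <= ny < n and maze[nx][ny] == 1 \
--                         and s[nx][ny] == 0 and (nx, ny) not in reach: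
--                     reach.add((nx, ny))
--                     new.append((nx, ny))
--         frontier = new
--     return (n - 1, n - 1) in reach
-- ===== Notes on version B (the rewrite author's own statement) =====
-- stated objective: alternative
-- what changed: A's recursive backtracking (mark a cell, recurse, unmark on failure, revisiting cells across branches) is replaced by an iterative breadth-first flood fill that precomputes the move list, keeps a visited set plus a frontier, and expands each reachable cell at most once.
-- outside the precondition, e.g. on RatMaze(2, [[0, 0], [0, 1]], [0], [1], 1, 0, [[0, 0], [0, 0]]): A returns True, B raises IndexError
import Mathlib
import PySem

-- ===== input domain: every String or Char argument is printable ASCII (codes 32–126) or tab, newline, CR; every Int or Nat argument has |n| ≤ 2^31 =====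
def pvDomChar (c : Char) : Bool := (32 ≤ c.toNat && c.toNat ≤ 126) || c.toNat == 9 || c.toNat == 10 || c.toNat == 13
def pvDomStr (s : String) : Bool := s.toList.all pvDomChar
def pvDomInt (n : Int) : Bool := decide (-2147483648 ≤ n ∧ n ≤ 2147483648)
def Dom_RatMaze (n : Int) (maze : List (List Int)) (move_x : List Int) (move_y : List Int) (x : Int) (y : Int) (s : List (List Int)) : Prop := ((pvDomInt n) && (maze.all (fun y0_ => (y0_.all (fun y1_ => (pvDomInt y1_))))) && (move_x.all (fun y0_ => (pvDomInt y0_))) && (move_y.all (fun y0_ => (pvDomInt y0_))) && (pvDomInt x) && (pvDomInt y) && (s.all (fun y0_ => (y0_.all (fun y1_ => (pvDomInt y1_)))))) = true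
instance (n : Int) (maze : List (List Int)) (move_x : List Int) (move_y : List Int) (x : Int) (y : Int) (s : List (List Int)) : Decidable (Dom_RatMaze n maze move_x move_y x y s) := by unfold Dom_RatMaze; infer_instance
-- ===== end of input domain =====

-- B replaces A's backtracking (mark, recurse, unmark) by an iterative frontier
-- flood fill that marks each cell visited at most once; only the RETURN value is compared:
-- Python A mutates s in place during the search (net effect: the found path stays marked on
-- a True result), B leaves s untouched.

-- ===== PORT A =====
-- Python A's `isValid`: the indexing maze[x][y] / s[x][y] happens only after the bounds
-- guards; Pre_ guarantees the rows exist and are long enough there, so `pyGetD … 0` is exact.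
def isValid (n : Int) (maze : List (List Int)) (x : Int) (y : Int) (s : List (List Int)) : Bool :=
  decide (x ≥ 0 ∧ y ≥ 0 ∧ x < n ∧ y < n ∧
    PySem.List.pyGetD (PySem.List.pyGetD maze x []) y 0 = 1 ∧
    PySem.List.pyGetD (PySem.List.pyGetD s x []) y 0 = 0)

-- the Python statement `s[x][y] = v`; every use site has 0 ≤ x < n ≤ len s (and the same for
-- y inside the row, by Pre_), where List.set is exact
def setCell (g : List (List Int)) (x y v : Int) : List (List Int) :=
  g.set x.toNat ((g.getD x.toNat []).set y.toNat v)

-- fuel bound for the recursion: every recursive call of A first marks a currently-0 cell,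
-- so the recursion depth never exceeds countZeros s + 1 (proved below)
def countZeros (g : List (List Int)) : Nat := (g.map (fun r => r.count 0)).sum

mutual
def ratAux (fuel : Nat) (n : Int) (maze : List (List Int)) (move_x move_y : List Int)
    (x y : Int) (s : List (List Int)) : Bool × List (List Int) :=
  match fuel with
  | 0 => (false, s)   -- unreachable with the fuel RatMaze supplies
  | f + 1 =>
    if x = n - 1 ∧ y = n - 1 then (true, s)
    else ratFor f n maze move_x move_y x y s (PySem.List.pyRange 0 n 1)
  termination_by (fuel, 0)

def ratFor (f : Nat) (n : Int) (maze : List (List Int)) (move_x move_y : List Int)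
    (x y : Int) (s : List (List Int)) (is : List Int) : Bool × List (List Int) :=
  match is with
  | [] => (false, s)
  | i :: rest =>
    let x_new := x + PySem.List.pyGetD move_x i 0
    let y_new := y + PySem.List.pyGetD move_y i 0
    if isValid n maze x_new y_new s then
      let r := ratAux f n maze move_x move_y x_new y_new (setCell s x_new y_new 1)
      if r.1 then (true, r.2)
      else ratFor f n maze move_x move_y x y (setCell r.2 x_new y_new 0) rest
    else ratFor f n maze move_x move_y x y s rest
  termination_by (f, is.length + 1)
end

def RatMaze (n : Int) (maze : List (List Int)) (move_x : List Int) (move_y : List Int) (x : Int) (y : Int) (s : List (List Int)) : Bool :=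
  (ratAux (countZeros s + 1) n maze move_x move_y x y s).1

-- ===== PORT B =====
-- one neighbour test of the flood fill (the body of Source B's innermost loop)
def bVisit (n : Int) (maze s : List (List Int)) (c : Int × Int)
    (acc : PySem.Set (Int × Int) × List (Int × Int)) (d : Int × Int) :
    PySem.Set (Int × Int) × List (Int × Int) :=
  let p : Int × Int := (c.1 + d.1, c.2 + d.2)
  if (0 ≤ p.1 ∧ p.1 < n ∧ 0 ≤ p.2 ∧ p.2 < n ∧
      PySem.List.pyGetD (PySem.List.pyGetD maze p.1 []) p.2 0 = 1 ∧
      PySem.List.pyGetD (PySem.List.pyGetD s p.1 []) p.2 0 = 0) ∧ p ∉ acc.1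
  then (PySem.Set.add acc.1 p, acc.2 ++ [p]) else acc

-- expanding one frontier cell (Source B's middle loop body)
def bRound (n : Int) (maze s : List (List Int)) (moves : List (Int × Int))
    (acc : PySem.Set (Int × Int) × List (Int × Int)) (c : Int × Int) :
    PySem.Set (Int × Int) × List (Int × Int) :=
  moves.foldl (bVisit n maze s c) acc

-- Source B's bounded outer loop with its `break`
def bLoop (n : Int) (maze s : List (List Int)) (moves : List (Int × Int))
    (rounds : List Int) (reach : PySem.Set (Int × Int)) (frontier : List (Int × Int)) :
    PySem.Set (Int × Int) :=
  match rounds with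
  | [] => reach
  | _ :: rest =>
    if frontier = [] then reach
    else
      let st := frontier.foldl (bRound n maze s moves) (reach, ([] : List (Int × Int)))
      bLoop n maze s moves rest st.1 st.2

def RatMaze_alt (n : Int) (maze : List (List Int)) (move_x : List Int) (move_y : List Int) (x : Int) (y : Int) (s : List (List Int)) : Bool :=
  if x = n - 1 ∧ y = n - 1 then true
  else
    let moves := (PySem.List.pyRange 0 n 1).map
      (fun i => (PySem.List.pyGetD move_x i 0, PySem.List.pyGetD move_y i 0))
    let reach := bLoop n maze s moves (PySem.List.pyRange 0 (n * n + 1) 1)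
      (PySem.Set.ofList [(x, y)]) [(x, y)]
    decide ((n - 1, n - 1) ∈ reach)

-- ===== PRECONDITION & SPEC =====
-- Pre_ excludes exactly the inputs on which the search indexes past the end of
-- move_x/move_y/maze/s (Python A raises IndexError there, except when A happens to return
-- True before touching the missing entry — on those B raises, so they cannot be matched);
-- when n ≤ 0 or the start is the goal corner nothing is ever indexed.
def Pre_RatMaze (n : Int) (maze : List (List Int)) (move_x : List Int) (move_y : List Int) (x : Int) (y : Int) (s : List (List Int)) : Prop :=
  (x = n - 1 ∧ y = n - 1) ∨ n ≤ 0 ∨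
  (n ≤ maze.length ∧ n ≤ s.length ∧ n ≤ move_x.length ∧ n ≤ move_y.length ∧
   ∀ i : Nat, i < n.toNat → n ≤ (maze.getD i []).length ∧ n ≤ (s.getD i []).length)
instance (n : Int) (maze : List (List Int)) (move_x : List Int) (move_y : List Int) (x : Int) (y : Int) (s : List (List Int)) : Decidable (Pre_RatMaze n maze move_x move_y x y s) := by unfold Pre_RatMaze; infer_instance

def pvWitness_RatMaze : Int × List (List Int) × List Int × List Int × Int × Int × List (List Int) :=
  (2, [[1, 1], [1, 1]], [1, 0], [0, 1], 0, 0, [[0, 0], [0, 0]])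

def Spec_RatMaze (n : Int) (maze : List (List Int)) (move_x : List Int) (move_y : List Int) (x : Int) (y : Int) (s : List (List Int)) (out : Bool) : Prop := out = RatMaze_alt n maze move_x move_y x y s
instance (n : Int) (maze : List (List Int)) (move_x : List Int) (move_y : List Int) (x : Int) (y : Int) (s : List (List Int)) (out : Bool) : Decidable (Spec_RatMaze n maze move_x move_y x y s out) := by unfold Spec_RatMaze; infer_instance

-- ===== CLAIM (what is proved, stated in full; the proofs are below) =====
def Claim_equal_RatMaze : Prop := ∀ (n : Int) (maze : List (List Int)) (move_x : List Int) (move_y : List Int) (x : Int) (y : Int) (s : List (List Int)), Dom_RatMaze n maze move_x move_y x y s → Pre_RatMaze n maze move_x move_y x y s → Spec_RatMaze n maze move_x move_y x y s (RatMaze n maze move_x move_y x y s)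

-- ===== LEMMAS AND PROOFS =====

theorem pvWitness_ok : Dom_RatMaze (pvWitness_RatMaze.1) (pvWitness_RatMaze.2.1) (pvWitness_RatMaze.2.2.1) (pvWitness_RatMaze.2.2.2.1) (pvWitness_RatMaze.2.2.2.2.1) (pvWitness_RatMaze.2.2.2.2.2.1) (pvWitness_RatMaze.2.2.2.2.2.2) ∧ Pre_RatMaze (pvWitness_RatMaze.1) (pvWitness_RatMaze.2.1) (pvWitness_RatMaze.2.2.1) (pvWitness_RatMaze.2.2.2.1) (pvWitness_RatMaze.2.2.2.2.1) (pvWitness_RatMaze.2.2.2.2.2.1) (pvWitness_RatMaze.2.2.2.2.2.2) := by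
  constructor <;> decide

-- ---- shared notions: cells, freeness, steps, paths ----

def cellVal (g : List (List Int)) (p : Int × Int) : Int :=
  PySem.List.pyGetD (PySem.List.pyGetD g p.1 []) p.2 0

def FreeP (n : Int) (maze g : List (List Int)) (p : Int × Int) : Prop :=
  0 ≤ p.1 ∧ p.1 < n ∧ 0 ≤ p.2 ∧ p.2 < n ∧ cellVal maze p = 1 ∧ cellVal g p = 0

def StepP (n : Int) (mx my : List Int) (p q : Int × Int) : Prop :=
  ∃ i : Int, 0 ≤ i ∧ i < n ∧
    q = (p.1 + PySem.List.pyGetD mx i 0, p.2 + PySem.List.pyGetD my i 0)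

def ChainC (n : Int) (mx my : List Int) : Int × Int → List (Int × Int) → Prop
  | _, [] => True
  | p, c :: l => StepP n mx my p c ∧ ChainC n mx my c l

def lastC : Int × Int → List (Int × Int) → Int × Int
  | p, [] => p
  | _, c :: l => lastC c l

def PathTo (n : Int) (maze : List (List Int)) (mx my : List Int) (g : List (List Int))
    (p : Int × Int) (l : List (Int × Int)) (q : Int × Int) : Prop :=
  ChainC n mx my p l ∧ (∀ c ∈ l, FreeP n maze g c) ∧ lastC p l = q

def ReachT (n : Int) (maze : List (List Int)) (mx my : List Int) (g : List (List Int))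
    (p : Int × Int) : Prop :=
  ∃ l, PathTo n maze mx my g p l (n - 1, n - 1)

def RowsOK (n : Int) (g : List (List Int)) : Prop :=
  n ≤ g.length ∧ ∀ i : Nat, i < n.toNat → n ≤ (g.getD i []).length

-- ---- small facts about cells and setCell ----

theorem pyGetD_nn {α : Type} (xs : List α) (i : Int) (d : α) (h : 0 ≤ i) :
    PySem.List.pyGetD xs i d = xs.getD i.toNat d := by
  have h1 : i = ((i.toNat : Nat) : Int) := by omega
  calc PySem.List.pyGetD xs i d = PySem.List.pyGetD xs ((i.toNat : Nat) : Int) d := by rw [← h1]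
    _ = xs.getD i.toNat d := PySem.List.pyGetD_natCast ..

theorem getD_getElem {α : Type} (l : List α) (i : Nat) (d : α) (h : i < l.length) :
    l.getD i d = l[i] := by
  rw [List.getD_eq_getElem?_getD, List.getElem?_eq_getElem h]; rfl

theorem list_decomp {α : Type} (l : List α) (m : Nat) (h : m < l.length) :
    l = l.take m ++ l[m] :: l.drop (m + 1) := by
  conv_lhs => rw [← List.take_append_drop m l]
  rw [← List.getElem_cons_drop h]

theorem getD_set_self {α : Type} (l : List α) (i : Nat) (r d : α) (h : i < l.length) :
    (l.set i r).getD i d = r := by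
  rw [List.getD_eq_getElem?_getD, List.getElem?_set]; simp [h]

theorem getD_set_ne {α : Type} (l : List α) (i j : Nat) (r d : α) (h : i ≠ j) :
    (l.set i r).getD j d = l.getD j d := by
  rw [List.getD_eq_getElem?_getD, List.getElem?_set, if_neg h, ← List.getD_eq_getElem?_getD]

theorem count_set_zero (row : List Int) (m : Nat) (h : m < row.length) (h0 : row[m] = 0) :
    (row.set m (1 : Int)).count 0 + 1 = row.count 0 := by
  have hs : row.set m 1 = row.take m ++ (1 : Int) :: row.drop (m + 1) := by
    rw [List.set_eq_take_append_cons_drop]; simp [h]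
  have hcnt : row.count 0 = (row.take m).count 0 + ((0 : Int) :: row.drop (m + 1)).count 0 := by
    conv_lhs => rw [list_decomp row m h, h0]
    rw [List.count_append]
  rw [hs, List.count_append, hcnt]
  simp
  omega

theorem sum_set_nat (l : List Nat) (m : Nat) (h : m < l.length) (v : Nat) :
    (l.set m v).sum + l[m] = l.sum + v := by
  have hs : l.set m v = l.take m ++ v :: l.drop (m + 1) := by
    rw [List.set_eq_take_append_cons_drop]; simp [h]
  have hsum : l.sum = (l.take m).sum + (l[m] + (l.drop (m + 1)).sum) := by
    conv_lhs => rw [list_decomp l m h]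
    rw [List.sum_append, List.sum_cons]
  rw [hs, List.sum_append, List.sum_cons, hsum]
  omega

theorem isValid_iff (n : Int) (maze : List (List Int)) (x y : Int) (s : List (List Int)) :
    isValid n maze x y s = true ↔ FreeP n maze s (x, y) := by
  simp [isValid, FreeP, cellVal]; tauto

theorem lastC_cons (c p : Int × Int) (l : List (Int × Int)) :
    lastC p (c :: l) = lastC c l := rfl

theorem lastC_append (p : Int × Int) (u v : List (Int × Int)) :
    lastC p (u ++ v) = lastC (lastC p u) v := by
  induction u generalizing p with
  | nil => rfl
  | cons c u ih => simpa [lastC] using ih c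

theorem chainC_append (n : Int) (mx my : List Int) (p : Int × Int)
    (u v : List (Int × Int)) :
    ChainC n mx my p (u ++ v) ↔ ChainC n mx my p u ∧ ChainC n mx my (lastC p u) v := by
  induction u generalizing p with
  | nil => simp [ChainC, lastC]
  | cons c u ih => simp [ChainC, lastC, ih c]; tauto

theorem lastC_concat (p : Int × Int) (u : List (Int × Int)) (q : Int × Int) :
    lastC p (u ++ [q]) = q := by
  rw [lastC_append]; rfl

theorem chain_suffix (n : Int) (mx my : List Int) (p0 q : Int × Int)
    (u v : List (Int × Int)) (h : ChainC n mx my p0 (u ++ q :: v)) : ChainC n mx my q v := by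
  have he : u ++ q :: v = (u ++ [q]) ++ v := by simp
  rw [he, chainC_append, lastC_concat] at h
  exact h.2

theorem cellVal_setCell_ne (g : List (List Int)) (a b v : Int) (p : Int × Int)
    (ha : 0 ≤ a) (hb : 0 ≤ b) (hp1 : 0 ≤ p.1) (hp2 : 0 ≤ p.2) (hne : p ≠ (a, b)) :
    cellVal (setCell g a b v) p = cellVal g p := by
  simp only [cellVal, setCell]
  rw [pyGetD_nn _ _ _ hp1, pyGetD_nn _ _ _ hp2, pyGetD_nn _ _ _ hp1, pyGetD_nn _ _ _ hp2]
  by_cases h1 : p.1 = a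
  · have hne2 : b.toNat ≠ p.2.toNat := by
      have : p.2 ≠ b := by
        intro h2; exact hne (by rw [Prod.ext_iff]; exact ⟨h1, h2⟩)
      omega
    rw [h1]
    by_cases hg : a.toNat < g.length
    · rw [getD_set_self _ _ _ _ hg, getD_set_ne _ _ _ _ _ hne2]
    · rw [List.set_eq_of_length_le (by omega)]
  · have hne1 : a.toNat ≠ p.1.toNat := by omega
    rw [getD_set_ne _ _ _ _ _ hne1]

theorem rowsOK_setCell (n : Int) (g : List (List Int)) (a b v : Int) (hOK : RowsOK n g) :
    RowsOK n (setCell g a b v) := by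
  refine ⟨by simpa [setCell] using hOK.1, fun i hi => ?_⟩
  have h2 := hOK.2 i hi
  simp only [setCell]
  by_cases he : a.toNat = i
  · subst he
    by_cases hg : a.toNat < g.length
    · rw [getD_set_self _ _ _ _ hg]
      simpa using h2
    · rw [List.set_eq_of_length_le (by omega)]; exact h2
  · rw [getD_set_ne _ _ _ _ _ he]; exact h2

theorem setCell_unmark (n : Int) (maze g : List (List Int)) (a b : Int)
    (hOK : RowsOK n g) (hf : FreeP n maze g (a, b)) :
    setCell (setCell g a b 1) a b 0 = g := by
  obtain ⟨ha, ha', hb, hb', _, h0⟩ := hf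
  have hg : a.toNat < g.length := by have := hOK.1; omega
  have hrow : n ≤ (g.getD a.toNat []).length := hOK.2 a.toNat (by omega)
  have hb1 : b.toNat < (g.getD a.toNat []).length := by omega
  have hrow0 : g[a.toNat].getD b.toNat 0 = 0 := by
    have := h0
    simp only [cellVal] at this
    rw [pyGetD_nn _ _ _ ha, pyGetD_nn _ _ _ hb, getD_getElem _ _ _ hg] at this
    exact this
  have hget : g.getD a.toNat [] = g[a.toNat] := getD_getElem _ _ _ hg
  simp only [setCell]
  rw [getD_set_self _ _ _ _ hg, List.set_set, hget, List.set_set]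
  have hbrow : b.toNat < g[a.toNat].length := by rw [← hget]; omega
  have : g[a.toNat].set b.toNat 0 = g[a.toNat] := by
    have h00 : g[a.toNat][b.toNat] = 0 := by
      rw [← getD_getElem _ _ (0 : Int) hbrow]; exact hrow0
    conv_rhs => rw [← List.set_getElem_self hbrow]
    rw [h00]
  rw [this, List.set_getElem_self hg]

theorem countZeros_setCell (n : Int) (maze g : List (List Int)) (a b : Int)
    (hOK : RowsOK n g) (hf : FreeP n maze g (a, b)) :
    countZeros (setCell g a b 1) + 1 = countZeros g := by
  obtain ⟨ha, ha', hb, hb', _, h0⟩ := hf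
  have hg : a.toNat < g.length := by have := hOK.1; omega
  have hrow : n ≤ (g.getD a.toNat []).length := hOK.2 a.toNat (by omega)
  have hb1 : b.toNat < (g.getD a.toNat []).length := by omega
  have hget : g.getD a.toNat [] = g[a.toNat] := getD_getElem _ _ _ hg
  have hbrow : b.toNat < g[a.toNat].length := by rw [← hget]; omega
  have h00 : g[a.toNat][b.toNat] = 0 := by
    simp only [cellVal] at h0
    rw [pyGetD_nn _ _ _ ha, pyGetD_nn _ _ _ hb, hget, getD_getElem _ _ _ hbrow] at h0
    exact h0
  simp only [countZeros, setCell, hget]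
  rw [List.map_set]
  have hmg : a.toNat < (g.map (fun r => r.count 0)).length := by simpa using hg
  have hsum := sum_set_nat (g.map (fun r => r.count 0)) a.toNat hmg
    ((g[a.toNat].set b.toNat 1).count 0)
  have hcnt := count_set_zero g[a.toNat] b.toNat hbrow h00
  have hmge : (g.map (fun r => r.count 0))[a.toNat] = g[a.toNat].count 0 := by simp
  rw [hmge] at hsum
  omega

theorem freeP_mark_of_ne (n : Int) (maze g : List (List Int)) (q : Int × Int)
    (hq : 0 ≤ q.1) (hq2 : 0 ≤ q.2) (c : Int × Int) (hc : FreeP n maze g c) (hne : c ≠ q) :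
    FreeP n maze (setCell g q.1 q.2 1) c := by
  refine ⟨hc.1, hc.2.1, hc.2.2.1, hc.2.2.2.1, hc.2.2.2.2.1, ?_⟩
  rw [cellVal_setCell_ne g q.1 q.2 1 c hq hq2 hc.1 hc.2.2.1 (by simpa using hne)]
  exact hc.2.2.2.2.2

theorem freeP_unmark (n : Int) (maze g : List (List Int)) (q : Int × Int)
    (hOK : RowsOK n g) (hq : FreeP n maze g q) (c : Int × Int)
    (hc : FreeP n maze (setCell g q.1 q.2 1) c) : FreeP n maze g c := by
  by_cases hne : c = q
  · subst hne; exact hq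
  · refine ⟨hc.1, hc.2.1, hc.2.2.1, hc.2.2.2.1, hc.2.2.2.2.1, ?_⟩
    rw [← cellVal_setCell_ne g q.1 q.2 1 c hq.1 hq.2.2.1 hc.1 hc.2.2.1 (by simpa using hne)]
    exact hc.2.2.2.2.2

theorem reachT_unmark (n : Int) (maze : List (List Int)) (mx my : List Int)
    (g : List (List Int)) (q : Int × Int) (hOK : RowsOK n g) (hq : FreeP n maze g q)
    (p : Int × Int) (h : ReachT n maze mx my (setCell g q.1 q.2 1) p) :
    ReachT n maze mx my g p := by
  obtain ⟨l, h1, h2, h3⟩ := h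
  exact ⟨l, h1, fun c hc => freeP_unmark n maze g q hOK hq c (h2 c hc), h3⟩

-- ---- A side: restore, soundness, completeness ----

theorem ratFor_restore (f : Nat) (n : Int) (maze : List (List Int)) (mx my : List Int)
    (hA : ∀ x y g, RowsOK n g → (ratAux f n maze mx my x y g).1 = false →
      (ratAux f n maze mx my x y g).2 = g)
    (x y : Int) (is : List Int) (g : List (List Int)) (hOK : RowsOK n g)
    (h : (ratFor f n maze mx my x y g is).1 = false) :
    (ratFor f n maze mx my x y g is).2 = g := by
  induction is with
  | nil => simp [ratFor]
  | cons i rest ih =>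
    rw [ratFor] at h ⊢
    simp only at h ⊢
    by_cases hv : isValid n maze (x + PySem.List.pyGetD mx i 0) (y + PySem.List.pyGetD my i 0) g
    · rw [if_pos hv] at h ⊢
      have hfree : FreeP n maze g (x + PySem.List.pyGetD mx i 0, y + PySem.List.pyGetD my i 0) :=
        (isValid_iff n maze _ _ g).mp hv
      have hOK' := rowsOK_setCell n g (x + PySem.List.pyGetD mx i 0) (y + PySem.List.pyGetD my i 0) (1 : Int) hOK
      cases hr : (ratAux f n maze mx my (x + PySem.List.pyGetD mx i 0)
          (y + PySem.List.pyGetD my i 0)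
          (setCell g (x + PySem.List.pyGetD mx i 0) (y + PySem.List.pyGetD my i 0) 1)).1 with
      | true => rw [hr] at h; simp at h
      | false =>
        rw [hr] at h
        simp only [Bool.false_eq_true, if_false] at h ⊢
        have hres := hA _ _ _ hOK' hr
        rw [hres, setCell_unmark n maze g _ _ hOK hfree] at h ⊢
        exact ih h
    · rw [if_neg hv] at h ⊢
      exact ih h

theorem ratAux_restore (f : Nat) (n : Int) (maze : List (List Int)) (mx my : List Int)
    (x y : Int) (g : List (List Int)) (hOK : RowsOK n g)
    (h : (ratAux f n maze mx my x y g).1 = false) :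
    (ratAux f n maze mx my x y g).2 = g := by
  induction f generalizing x y g with
  | zero => simp [ratAux]
  | succ f ih =>
    rw [ratAux] at h ⊢
    by_cases ht : x = n - 1 ∧ y = n - 1
    · rw [if_pos ht] at h; simp at h
    · rw [if_neg ht] at h ⊢
      exact ratFor_restore f n maze mx my (fun x y g hOK' hf => ih x y g hOK' hf)
        x y _ g hOK h

theorem ratFor_sound (f : Nat) (n : Int) (maze : List (List Int)) (mx my : List Int)
    (hA : ∀ x y g, RowsOK n g → (ratAux f n maze mx my x y g).1 = true →
      ReachT n maze mx my g (x, y))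
    (x y : Int) (is : List Int) (g : List (List Int)) (hOK : RowsOK n g)
    (h : (ratFor f n maze mx my x y g is).1 = true) :
    ∃ i ∈ is, FreeP n maze g (x + PySem.List.pyGetD mx i 0, y + PySem.List.pyGetD my i 0) ∧
      ReachT n maze mx my g (x + PySem.List.pyGetD mx i 0, y + PySem.List.pyGetD my i 0) := by
  induction is with
  | nil => simp [ratFor] at h
  | cons i rest ih =>
    rw [ratFor] at h
    simp only at h
    by_cases hv : isValid n maze (x + PySem.List.pyGetD mx i 0) (y + PySem.List.pyGetD my i 0) g
    · rw [if_pos hv] at h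
      have hfree : FreeP n maze g (x + PySem.List.pyGetD mx i 0, y + PySem.List.pyGetD my i 0) :=
        (isValid_iff n maze _ _ g).mp hv
      have hOK' := rowsOK_setCell n g (x + PySem.List.pyGetD mx i 0)
        (y + PySem.List.pyGetD my i 0) (1 : Int) hOK
      cases hr : (ratAux f n maze mx my (x + PySem.List.pyGetD mx i 0)
          (y + PySem.List.pyGetD my i 0)
          (setCell g (x + PySem.List.pyGetD mx i 0) (y + PySem.List.pyGetD my i 0) 1)).1 with
      | true =>
        refine ⟨i, List.mem_cons_self, hfree, ?_⟩
        have hre := hA _ _ _ hOK' hr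
        exact reachT_unmark n maze mx my g _ hOK hfree _ hre
      | false =>
        rw [hr] at h
        simp only [Bool.false_eq_true, if_false] at h
        have hres := ratAux_restore f n maze mx my _ _ _ hOK' hr
        rw [hres, setCell_unmark n maze g _ _ hOK hfree] at h
        obtain ⟨j, hj, hf, hr2⟩ := ih h
        exact ⟨j, List.mem_cons_of_mem i hj, hf, hr2⟩
    · rw [if_neg hv] at h
      obtain ⟨j, hj, hf, hr2⟩ := ih h
      exact ⟨j, List.mem_cons_of_mem i hj, hf, hr2⟩

theorem ratAux_sound (f : Nat) (n : Int) (maze : List (List Int)) (mx my : List Int)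
    (x y : Int) (g : List (List Int)) (hOK : RowsOK n g)
    (h : (ratAux f n maze mx my x y g).1 = true) : ReachT n maze mx my g (x, y) := by
  induction f generalizing x y g with
  | zero => simp [ratAux] at h
  | succ f ih =>
    rw [ratAux] at h
    by_cases ht : x = n - 1 ∧ y = n - 1
    · refine ⟨[], trivial, by simp, ?_⟩
      simp [lastC, ht.1, ht.2]
    · rw [if_neg ht] at h
      obtain ⟨i, hi, hfree, ⟨l, hc, hf, hl⟩⟩ :=
        ratFor_sound f n maze mx my (fun x y g hOK' hh => ih x y g hOK' hh) x y _ g hOK h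
      obtain ⟨h0, hn⟩ := PySem.List.mem_pyRange_one.mp hi
      refine ⟨(x + PySem.List.pyGetD mx i 0, y + PySem.List.pyGetD my i 0) :: l,
        ⟨⟨i, h0, hn, rfl⟩, hc⟩, ?_, hl⟩
      intro c hcmem
      rcases List.mem_cons.mp hcmem with h | h
      · subst h; exact hfree
      · exact hf c h

theorem path_shorten (n : Int) (maze : List (List Int)) (mx my : List Int)
    (g : List (List Int)) (l : List (Int × Int)) (p q : Int × Int)
    (h : PathTo n maze mx my g p l q) :
    ∃ l', PathTo n maze mx my g p l' q ∧ (p :: l').Nodup ∧ l'.length ≤ l.length := by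
  induction l generalizing p with
  | nil => exact ⟨[], h, by simp, by simp⟩
  | cons c m ih =>
    obtain ⟨⟨hstep, hchain⟩, hfree, hlast⟩ := h
    obtain ⟨m', ⟨hc', hf', hl'⟩, hnd', hlen'⟩ :=
      ih c ⟨hchain, fun d hd => hfree d (List.mem_cons_of_mem c hd), hlast⟩
    by_cases hp : p ∈ c :: m'
    · obtain ⟨u, v, huv⟩ := List.append_of_mem hp
      have hchv : ChainC n mx my p v := by
        cases u with
        | nil =>
          simp at huv
          rw [huv.1, huv.2] at hc'; exact hc'
        | cons c0 u' =>
          simp at huv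
          rw [huv.2] at hc'
          exact chain_suffix n mx my c p u' v hc'
      have hfv : ∀ d ∈ v, FreeP n maze g d := by
        intro d hd
        have : d ∈ c :: m' := by rw [huv]; exact List.mem_append_right u (List.mem_cons_of_mem p hd)
        rcases List.mem_cons.mp this with h1 | h1
        · rw [h1]; exact hfree c List.mem_cons_self
        · exact hf' d h1
      have hlv : lastC p v = q := by
        have h1 : lastC p (c :: m') = q := by rw [lastC_cons]; exact hl'
        rw [huv, show u ++ p :: v = (u ++ [p]) ++ v by simp, lastC_append, lastC_concat]
          at h1
        exact h1
      have hndv : (p :: v).Nodup := by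
        have hsub : (p :: v).Sublist (c :: m') := by
          rw [huv]; exact List.sublist_append_right u (p :: v)
        exact hnd'.sublist hsub
      refine ⟨v, ⟨hchv, hfv, hlv⟩, hndv, ?_⟩
      have : m'.length + 1 = u.length + (v.length + 1) := by
        have := congrArg List.length huv; simpa using this
      simp only [List.length_cons]; omega
    · refine ⟨c :: m', ⟨⟨hstep, hc'⟩, ?_, by rw [lastC_cons]; exact hl'⟩, ?_, by simpa using hlen'⟩
      · intro d hd
        rcases List.mem_cons.mp hd with h1 | h1
        · rw [h1]; exact hfree c List.mem_cons_self
        · exact hf' d h1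
      · exact List.nodup_cons.mpr ⟨hp, hnd'⟩

theorem ratFor_complete (f : Nat) (n : Int) (maze : List (List Int)) (mx my : List Int)
    (x y : Int) (is : List Int) (g : List (List Int)) (hOK : RowsOK n g)
    (h : ∃ i ∈ is,
      FreeP n maze g (x + PySem.List.pyGetD mx i 0, y + PySem.List.pyGetD my i 0) ∧
      (ratAux f n maze mx my (x + PySem.List.pyGetD mx i 0) (y + PySem.List.pyGetD my i 0)
        (setCell g (x + PySem.List.pyGetD mx i 0) (y + PySem.List.pyGetD my i 0) 1)).1 = true) :
    (ratFor f n maze mx my x y g is).1 = true := by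
  induction is with
  | nil => simp at h
  | cons i0 rest ih =>
    obtain ⟨i, hi, hfree, htrue⟩ := h
    rw [ratFor]
    simp only
    by_cases hv : isValid n maze (x + PySem.List.pyGetD mx i0 0) (y + PySem.List.pyGetD my i0 0) g
    · have hfree0 : FreeP n maze g (x + PySem.List.pyGetD mx i0 0, y + PySem.List.pyGetD my i0 0) :=
        (isValid_iff n maze _ _ g).mp hv
      have hOK' := rowsOK_setCell n g (x + PySem.List.pyGetD mx i0 0)
        (y + PySem.List.pyGetD my i0 0) (1 : Int) hOK
      rw [if_pos hv]
      cases hr : (ratAux f n maze mx my (x + PySem.List.pyGetD mx i0 0)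
          (y + PySem.List.pyGetD my i0 0)
          (setCell g (x + PySem.List.pyGetD mx i0 0) (y + PySem.List.pyGetD my i0 0) 1)).1 with
      | true => simp
      | false =>
        simp only [Bool.false_eq_true, if_false]
        have hres := ratAux_restore f n maze mx my _ _ _ hOK' hr
        rw [hres, setCell_unmark n maze g _ _ hOK hfree0]
        rcases List.mem_cons.mp hi with he | hm
        · subst he; rw [htrue] at hr; cases hr
        · exact ih ⟨i, hm, hfree, htrue⟩
    · rw [if_neg hv]
      rcases List.mem_cons.mp hi with he | hm
      · subst he; exact absurd ((isValid_iff n maze _ _ g).mpr hfree) hv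
      · exact ih ⟨i, hm, hfree, htrue⟩

theorem ratAux_complete (f : Nat) (n : Int) (maze : List (List Int)) (mx my : List Int)
    (x y : Int) (g : List (List Int)) (hOK : RowsOK n g) (hfuel : countZeros g + 1 ≤ f)
    (h : ReachT n maze mx my g (x, y)) : (ratAux f n maze mx my x y g).1 = true := by
  induction f generalizing x y g with
  | zero => omega
  | succ f ih =>
    rw [ratAux]
    by_cases ht : x = n - 1 ∧ y = n - 1
    · rw [if_pos ht]
    · rw [if_neg ht]
      obtain ⟨l, hp⟩ := h
      obtain ⟨l', ⟨hc', hf', hl'⟩, hnd', _⟩ := path_shorten n maze mx my g l (x, y) _ hp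
      cases l' with
      | nil =>
        exfalso; apply ht
        have : (x, y) = (n - 1, n - 1) := hl'
        exact ⟨congrArg Prod.fst this, congrArg Prod.snd this⟩
      | cons c m =>
        obtain ⟨hstep, hchain⟩ := hc'
        obtain ⟨i, h0, hn, hq⟩ := hstep
        have hfreec : FreeP n maze g c := hf' c List.mem_cons_self
        have hOK' := rowsOK_setCell n g c.1 c.2 (1 : Int) hOK
        have hcz := countZeros_setCell n maze g c.1 c.2 hOK (by simpa using hfreec)
        have hreach' : ReachT n maze mx my (setCell g c.1 c.2 1) c := by
          refine ⟨m, hchain, ?_, by rw [← lastC_cons c c m]; exact hl'⟩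
          intro d hd
          have hdne : d ≠ c := by
            intro he; subst he
            exact (List.nodup_cons.mp (List.nodup_cons.mp hnd').2).1 hd
          exact freeP_mark_of_ne n maze g c hfreec.1 hfreec.2.2.1 d (hf' d (List.mem_cons_of_mem c hd)) hdne
        have htrue := ih c.1 c.2 (setCell g c.1 c.2 1) hOK' (by omega)
          (by simpa using hreach')
        have he1 : c.1 = x + PySem.List.pyGetD mx i 0 := by rw [hq]
        have he2 : c.2 = y + PySem.List.pyGetD my i 0 := by rw [hq]
        apply ratFor_complete f n maze mx my x y _ g hOK
        refine ⟨i, PySem.List.mem_pyRange_one.mpr ⟨h0, hn⟩, ?_, ?_⟩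
        · rw [← he1, ← he2]; simpa using hfreec
        · rw [← he1, ← he2]; exact htrue

-- ---- B side: the flood fill computes exactly the reachable set ----

def GoodB (n : Int) (maze : List (List Int)) (mx my : List Int) (s : List (List Int))
    (start : Int × Int) (reach : List (Int × Int)) (frontier : List (Int × Int)) : Prop :=
  start ∈ reach ∧
  (∀ q ∈ reach, q = start ∨ (FreeP n maze s q ∧ ∃ l, PathTo n maze mx my s start l q)) ∧
  (∀ q ∈ frontier, q ∈ reach) ∧
  (∀ p ∈ reach, p ∉ frontier → ∀ q, StepP n mx my p q → FreeP n maze s q → q ∈ reach)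

def DistB (n : Int) (maze : List (List Int)) (mx my : List Int) (s : List (List Int))
    (start : Int × Int) (k : Nat) (reach : List (Int × Int)) : Prop :=
  ∀ q l, PathTo n maze mx my s start l q → l.length ≤ k → q ∈ reach

-- the moves list B precomputes
def movesL (n : Int) (mx my : List Int) : List (Int × Int) :=
  (PySem.List.pyRange 0 n 1).map
    (fun i => (PySem.List.pyGetD mx i 0, PySem.List.pyGetD my i 0))

theorem stepP_iff_moves (n : Int) (mx my : List Int) (p q : Int × Int) :
    StepP n mx my p q ↔ ∃ d ∈ movesL n mx my, q = (p.1 + d.1, p.2 + d.2) := by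
  simp only [movesL, List.mem_map, StepP]
  constructor
  · rintro ⟨i, h1, h2, rfl⟩
    exact ⟨_, ⟨i, PySem.List.mem_pyRange_one.mpr ⟨h1, h2⟩, rfl⟩, rfl⟩
  · rintro ⟨d, ⟨i, hi, rfl⟩, rfl⟩
    obtain ⟨h1, h2⟩ := PySem.List.mem_pyRange_one.mp hi
    exact ⟨i, h1, h2, rfl⟩

theorem set_add_of_not_mem (sa : PySem.Set (Int × Int)) (p : Int × Int) (h : p ∉ sa) :
    PySem.Set.add sa p = sa ++ [p] := by
  simp [PySem.Set.add, PySem.Set.contains]; simp_all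

theorem bVisit_pos (n : Int) (maze s : List (List Int)) (c : Int × Int)
    (acc : PySem.Set (Int × Int) × List (Int × Int)) (d : Int × Int)
    (hfree : FreeP n maze s (c.1 + d.1, c.2 + d.2)) (hnm : (c.1 + d.1, c.2 + d.2) ∉ acc.1) :
    bVisit n maze s c acc d =
      (acc.1 ++ [(c.1 + d.1, c.2 + d.2)], acc.2 ++ [(c.1 + d.1, c.2 + d.2)]) := by
  obtain ⟨h1, h2, h3, h4, h5, h6⟩ := hfree
  simp only [bVisit]
  rw [if_pos ⟨⟨h1, h2, h3, h4, h5, h6⟩, hnm⟩, set_add_of_not_mem acc.1 _ hnm]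

theorem bVisit_neg (n : Int) (maze s : List (List Int)) (c : Int × Int)
    (acc : PySem.Set (Int × Int) × List (Int × Int)) (d : Int × Int)
    (h : ¬(FreeP n maze s (c.1 + d.1, c.2 + d.2) ∧ (c.1 + d.1, c.2 + d.2) ∉ acc.1)) :
    bVisit n maze s c acc d = acc := by
  simp only [bVisit]
  rw [if_neg]
  intro ⟨⟨h1, h2, h3, h4, h5, h6⟩, hnm⟩
  exact h ⟨⟨h1, h2, h3, h4, h5, h6⟩, hnm⟩

theorem bVisit_super (n : Int) (maze s : List (List Int)) (c : Int × Int)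
    (acc : PySem.Set (Int × Int) × List (Int × Int)) (d : Int × Int) (q : Int × Int)
    (h : q ∈ acc.1) : q ∈ (bVisit n maze s c acc d).1 := by
  by_cases hc : FreeP n maze s (c.1 + d.1, c.2 + d.2) ∧ (c.1 + d.1, c.2 + d.2) ∉ acc.1
  · rw [bVisit_pos n maze s c acc d hc.1 hc.2]; exact List.mem_append_left _ h
  · rw [bVisit_neg n maze s c acc d hc]; exact h

theorem inner_J (n : Int) (maze s : List (List Int)) (c : Int × Int)
    (moves : List (Int × Int)) (reach : List (Int × Int)) :
    ∀ acc : PySem.Set (Int × Int) × List (Int × Int), acc.1 = reach ++ acc.2 →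
      (moves.foldl (bVisit n maze s c) acc).1 = reach ++ (moves.foldl (bVisit n maze s c) acc).2 := by
  induction moves with
  | nil => intro acc h; exact h
  | cons d ms ih =>
    intro acc h
    simp only [List.foldl_cons]
    apply ih
    by_cases hc : FreeP n maze s (c.1 + d.1, c.2 + d.2) ∧ (c.1 + d.1, c.2 + d.2) ∉ acc.1
    · rw [bVisit_pos n maze s c acc d hc.1 hc.2]; simp [h]
    · rw [bVisit_neg n maze s c acc d hc]; exact h

theorem inner_mono (n : Int) (maze s : List (List Int)) (c : Int × Int)
    (moves : List (Int × Int)) :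
    ∀ acc : PySem.Set (Int × Int) × List (Int × Int), ∀ q ∈ acc.1,
      q ∈ (moves.foldl (bVisit n maze s c) acc).1 := by
  induction moves with
  | nil => intro acc q h; exact h
  | cons d ms ih =>
    intro acc q h
    simp only [List.foldl_cons]
    exact ih _ q (bVisit_super n maze s c acc d q h)

theorem inner_new_sound (n : Int) (maze s : List (List Int)) (c : Int × Int)
    (moves : List (Int × Int)) :
    ∀ acc : PySem.Set (Int × Int) × List (Int × Int), ∀ q ∈ (moves.foldl (bVisit n maze s c) acc).2,
      q ∈ acc.2 ∨ ∃ d ∈ moves, q = (c.1 + d.1, c.2 + d.2) ∧ FreeP n maze s q := by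
  induction moves with
  | nil => intro acc q h; exact Or.inl h
  | cons d ms ih =>
    intro acc q h
    simp only [List.foldl_cons] at h
    by_cases hc : FreeP n maze s (c.1 + d.1, c.2 + d.2) ∧ (c.1 + d.1, c.2 + d.2) ∉ acc.1
    · rw [bVisit_pos n maze s c acc d hc.1 hc.2] at h
      rcases ih _ q h with h1 | ⟨d', hd', he, hf⟩
      · simp only at h1
        rcases List.mem_append.mp h1 with h2 | h2
        · exact Or.inl h2
        · simp at h2
          exact Or.inr ⟨d, List.mem_cons_self, h2, by rw [h2]; exact hc.1⟩
      · exact Or.inr ⟨d', List.mem_cons_of_mem d hd', he, hf⟩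
    · rw [bVisit_neg n maze s c acc d hc] at h
      rcases ih _ q h with h1 | ⟨d', hd', he, hf⟩
      · exact Or.inl h1
      · exact Or.inr ⟨d', List.mem_cons_of_mem d hd', he, hf⟩

theorem inner_closure (n : Int) (maze s : List (List Int)) (c : Int × Int)
    (moves : List (Int × Int)) :
    ∀ acc : PySem.Set (Int × Int) × List (Int × Int), ∀ d ∈ moves,
      FreeP n maze s (c.1 + d.1, c.2 + d.2) →
      (c.1 + d.1, c.2 + d.2) ∈ (moves.foldl (bVisit n maze s c) acc).1 := by
  induction moves with
  | nil => intro _ d h; cases h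
  | cons d0 ms ih =>
    intro acc d hd hfree
    simp only [List.foldl_cons]
    rcases List.mem_cons.mp hd with he | hm
    · subst he
      apply inner_mono
      by_cases hmem : (c.1 + d.1, c.2 + d.2) ∈ acc.1
      · exact bVisit_super n maze s c acc d _ hmem
      · rw [bVisit_pos n maze s c acc d hfree hmem]
        simp
    · exact ih _ d hm hfree

theorem bRound_J (n : Int) (maze s : List (List Int)) (moves : List (Int × Int))
    (frontier : List (Int × Int)) (reach : List (Int × Int))
    (acc : PySem.Set (Int × Int) × List (Int × Int)) (hJ : acc.1 = reach ++ acc.2) :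
    (frontier.foldl (bRound n maze s moves) acc).1 =
      reach ++ (frontier.foldl (bRound n maze s moves) acc).2 := by
  induction frontier generalizing acc with
  | nil => exact hJ
  | cons c rest ih =>
    simp only [List.foldl_cons]
    exact ih _ (inner_J n maze s c moves reach acc hJ)

theorem bRound_new_sound (n : Int) (maze s : List (List Int)) (moves : List (Int × Int))
    (frontier : List (Int × Int)) (acc : PySem.Set (Int × Int) × List (Int × Int))
    (q : Int × Int) (hq : q ∈ (frontier.foldl (bRound n maze s moves) acc).2) :
    q ∈ acc.2 ∨ ∃ c ∈ frontier, ∃ d ∈ moves, q = (c.1 + d.1, c.2 + d.2) ∧ FreeP n maze s q := by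
  induction frontier generalizing acc with
  | nil => exact Or.inl hq
  | cons c rest ih =>
    simp only [List.foldl_cons] at hq
    rcases ih _ hq with h1 | ⟨c', hc', hrest⟩
    · rcases inner_new_sound n maze s c moves acc q h1 with h2 | ⟨d, hd, he, hf⟩
      · exact Or.inl h2
      · exact Or.inr ⟨c, List.mem_cons_self, d, hd, he, hf⟩
    · exact Or.inr ⟨c', List.mem_cons_of_mem c hc', hrest⟩

theorem bRound_mono (n : Int) (maze s : List (List Int)) (moves : List (Int × Int))
    (frontier : List (Int × Int)) (acc : PySem.Set (Int × Int) × List (Int × Int))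
    (q : Int × Int) (hq : q ∈ acc.1) : q ∈ (frontier.foldl (bRound n maze s moves) acc).1 := by
  induction frontier generalizing acc with
  | nil => exact hq
  | cons c rest ih =>
    simp only [List.foldl_cons]
    exact ih _ (inner_mono n maze s c moves acc q hq)

theorem bRound_closure (n : Int) (maze s : List (List Int)) (moves : List (Int × Int))
    (frontier : List (Int × Int)) (acc : PySem.Set (Int × Int) × List (Int × Int))
    (c : Int × Int) (hc : c ∈ frontier) (d : Int × Int) (hd : d ∈ moves)
    (hfree : FreeP n maze s (c.1 + d.1, c.2 + d.2)) :
    (c.1 + d.1, c.2 + d.2) ∈ (frontier.foldl (bRound n maze s moves) acc).1 := by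
  induction frontier generalizing acc with
  | nil => cases hc
  | cons c0 rest ih =>
    simp only [List.foldl_cons]
    rcases List.mem_cons.mp hc with he | hm
    · subst he
      exact bRound_mono n maze s moves rest _ _ (inner_closure n maze s c moves acc d hd hfree)
    · exact ih _ hm

theorem pathTo_snoc (n : Int) (maze : List (List Int)) (mx my : List Int)
    (s : List (List Int)) (start : Int × Int) (l : List (Int × Int)) (c q : Int × Int)
    (h : PathTo n maze mx my s start l c) (hstep : StepP n mx my c q)
    (hfree : FreeP n maze s q) : PathTo n maze mx my s start (l ++ [q]) q := by
  obtain ⟨h1, h2, h3⟩ := h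
  refine ⟨?_, ?_, ?_⟩
  · rw [chainC_append]; exact ⟨h1, by rw [h3]; exact ⟨hstep, trivial⟩⟩
  · intro c' hc'; rcases List.mem_append.mp hc' with h | h
    · exact h2 c' h
    · simp at h; subst h; exact hfree
  · rw [lastC_append, h3]; rfl

theorem roundGood (n : Int) (maze : List (List Int)) (mx my : List Int)
    (s : List (List Int)) (start : Int × Int) (reach frontier : List (Int × Int))
    (hG : GoodB n maze mx my s start reach frontier) :
    GoodB n maze mx my s start
      (frontier.foldl (bRound n maze s (movesL n mx my)) (reach, [])).1
      (frontier.foldl (bRound n maze s (movesL n mx my)) (reach, [])).2 := by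
  obtain ⟨hstart, hsound, hfr, hclos⟩ := hG
  have hJ := bRound_J n maze s (movesL n mx my) frontier reach (reach, []) (by simp)
  refine ⟨?_, ?_, ?_, ?_⟩
  · rw [hJ]; exact List.mem_append_left _ hstart
  · intro q hq
    rw [hJ] at hq
    rcases List.mem_append.mp hq with h1 | h1
    · exact hsound q h1
    · rcases bRound_new_sound n maze s (movesL n mx my) frontier (reach, []) q h1 with
        h2 | ⟨c, hcf, d, hd, he, hf⟩
      · simp at h2
      · have hcr := hfr c hcf
        rcases hsound c hcr with he2 | ⟨hcfree, l, hpath⟩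
        · refine Or.inr ⟨hf, [q], ⟨?_, trivial⟩, ?_, rfl⟩
          · refine (stepP_iff_moves n mx my start q).mpr ⟨d, hd, ?_⟩
            rw [he, he2]
          · intro e hemem; simp at hemem; rw [hemem]; exact hf
        · refine Or.inr ⟨hf, l ++ [q], ?_⟩
          refine pathTo_snoc n maze mx my s start l c q hpath ?_ hf
          exact (stepP_iff_moves n mx my c q).mpr ⟨d, hd, he⟩
  · intro q hq
    rw [hJ]; exact List.mem_append_right _ hq
  · intro p hp hnf q hst hfq
    rw [hJ] at hp
    rcases List.mem_append.mp hp with h1 | h1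
    · by_cases hpf : p ∈ frontier
      · obtain ⟨d, hd, he⟩ := (stepP_iff_moves n mx my p q).mp hst
        rw [he]
        exact bRound_closure n maze s (movesL n mx my) frontier (reach, []) p hpf d hd
          (he ▸ hfq)
      · have := hclos p h1 hpf q hst hfq
        rw [hJ]; exact List.mem_append_left _ this
    · exact absurd h1 hnf

theorem roundDist (n : Int) (maze : List (List Int)) (mx my : List Int)
    (s : List (List Int)) (start : Int × Int) (reach frontier : List (Int × Int)) (k : Nat)
    (hG : GoodB n maze mx my s start reach frontier)
    (hD : DistB n maze mx my s start k reach) :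
    DistB n maze mx my s start (k + 1)
      (frontier.foldl (bRound n maze s (movesL n mx my)) (reach, [])).1 := by
  obtain ⟨hstart, hsound, hfr, hclos⟩ := hG
  have hJ := bRound_J n maze s (movesL n mx my) frontier reach (reach, []) (by simp)
  intro q l hpath hlen
  by_cases hk : l.length ≤ k
  · have := hD q l hpath hk
    rw [hJ]; exact List.mem_append_left _ this
  · have hlen1 : l.length = k + 1 := by omega
    have hl0 : l ≠ [] := by intro h; rw [h] at hlen1; simp at hlen1
    obtain ⟨l₀, q', hql⟩ : ∃ L b, l = L ++ [b] := by
      rcases List.eq_nil_or_concat l with h | h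
      · exact absurd h hl0
      · simpa [List.concat_eq_append] using h
    subst hql
    obtain ⟨hchain, hfree, hlast⟩ := hpath
    have hq : q' = q := by rw [lastC_append] at hlast; exact hlast
    rw [← hq]
    obtain ⟨hch0, hchq⟩ := (chainC_append n mx my start l₀ [q']).mp hchain
    have hstep : StepP n mx my (lastC start l₀) q' := hchq.1
    have hpath0 : PathTo n maze mx my s start l₀ (lastC start l₀) :=
      ⟨hch0, fun c hc => hfree c (List.mem_append_left _ hc), rfl⟩
    have hp'reach : lastC start l₀ ∈ reach := by
      apply hD _ l₀ hpath0
      simp at hlen1; omega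
    have hfq : FreeP n maze s q' := hfree q' (by simp)
    by_cases hpf : lastC start l₀ ∈ frontier
    · obtain ⟨d, hd, he⟩ := (stepP_iff_moves n mx my (lastC start l₀) q').mp hstep
      rw [he]
      exact bRound_closure n maze s (movesL n mx my) frontier (reach, []) _ hpf d hd (he ▸ hfq)
    · have := hclos _ hp'reach hpf q' hstep hfq
      rw [hJ]; exact List.mem_append_left _ this

theorem closed_total (n : Int) (maze : List (List Int)) (mx my : List Int)
    (s : List (List Int)) (start : Int × Int) (reach : List (Int × Int))
    (hG : GoodB n maze mx my s start reach []) :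
    ∀ q l, PathTo n maze mx my s start l q → q ∈ reach := by
  obtain ⟨hstart, _, _, hclos⟩ := hG
  have aux : ∀ l p, p ∈ reach → ChainC n mx my p l → (∀ c ∈ l, FreeP n maze s c) →
      lastC p l ∈ reach := by
    intro l
    induction l with
    | nil => intro p hp _ _; exact hp
    | cons c m ih =>
      intro p hp hchain hfree
      obtain ⟨hstep, hchain2⟩ := hchain
      have hc : c ∈ reach :=
        hclos p hp (by simp) c hstep (hfree c List.mem_cons_self)
      rw [lastC_cons]
      exact ih c hc hchain2 (fun d hd => hfree d (List.mem_cons_of_mem c hd))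
  intro q l ⟨hc, hf, hl⟩
  rw [← hl]
  exact aux l start hstart hc hf

theorem bLoop_sound (n : Int) (maze : List (List Int)) (mx my : List Int)
    (s : List (List Int)) (start : Int × Int) (rounds : List Int)
    (reach frontier : List (Int × Int)) (hG : GoodB n maze mx my s start reach frontier) :
    ∀ q ∈ bLoop n maze s (movesL n mx my) rounds reach frontier,
      q = start ∨ (FreeP n maze s q ∧ ∃ l, PathTo n maze mx my s start l q) := by
  induction rounds generalizing reach frontier with
  | nil => rw [bLoop]; exact hG.2.1
  | cons r rest ih =>
    rw [bLoop]
    by_cases hf : frontier = []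
    · rw [if_pos hf]; exact hG.2.1
    · rw [if_neg hf]
      exact ih _ _ (roundGood n maze mx my s start reach frontier hG)

theorem bLoop_complete (n : Int) (maze : List (List Int)) (mx my : List Int)
    (s : List (List Int)) (start : Int × Int) (rounds : List Int) (k : Nat)
    (reach frontier : List (Int × Int)) (hG : GoodB n maze mx my s start reach frontier)
    (hD : DistB n maze mx my s start k reach) :
    ∀ q l, PathTo n maze mx my s start l q → l.length ≤ k + rounds.length →
      q ∈ bLoop n maze s (movesL n mx my) rounds reach frontier := by
  induction rounds generalizing k reach frontier with
  | nil =>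
    intro q l hp hlen
    rw [bLoop]
    exact hD q l hp (by simpa using hlen)
  | cons r rest ih =>
    intro q l hp hlen
    rw [bLoop]
    by_cases hf : frontier = []
    · rw [if_pos hf]
      subst hf
      exact closed_total n maze mx my s start reach hG q l hp
    · rw [if_neg hf]
      refine ih (k + 1) _ _ (roundGood n maze mx my s start reach frontier hG)
        (roundDist n maze mx my s start reach frontier k hG hD) q l hp ?_
      simp only [List.length_cons] at hlen
      omega

-- ---- assembling the characterizations ----

theorem A_char (n : Int) (maze : List (List Int)) (mx my : List Int) (x y : Int)
    (s : List (List Int)) (hOK : RowsOK n s) :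
    RatMaze n maze mx my x y s = true ↔ ReachT n maze mx my s (x, y) := by
  constructor
  · exact fun h => ratAux_sound _ n maze mx my x y s hOK h
  · exact fun h => ratAux_complete _ n maze mx my x y s hOK (le_refl _) h

theorem nodup_path_short (n : Int) (maze : List (List Int)) (mx my : List Int)
    (s : List (List Int)) (start q : Int × Int) (l : List (Int × Int))
    (hl : PathTo n maze mx my s start l q) (hnd : l.Nodup) :
    l.length ≤ n.toNat * n.toNat := by
  have hsub : l ⊆ PySem.List.pyRange 0 n 1 ×ˢ PySem.List.pyRange 0 n 1 := by
    intro c hc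
    have hf := hl.2.1 c hc
    have : (c.1, c.2) ∈ PySem.List.pyRange 0 n 1 ×ˢ PySem.List.pyRange 0 n 1 :=
      List.pair_mem_product.mpr
        ⟨PySem.List.mem_pyRange_one.mpr ⟨hf.1, hf.2.1⟩,
         PySem.List.mem_pyRange_one.mpr ⟨hf.2.2.1, hf.2.2.2.1⟩⟩
    simpa using this
  have h1 : l.toFinset.card = l.length := List.toFinset_card_of_nodup hnd
  have h2 : l.toFinset ⊆ (PySem.List.pyRange 0 n 1 ×ˢ PySem.List.pyRange 0 n 1).toFinset := by
    intro a ha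
    rw [List.mem_toFinset] at ha ⊢
    exact hsub ha
  have h3 := Finset.card_le_card h2
  have h4 := List.toFinset_card_le (PySem.List.pyRange 0 n 1 ×ˢ PySem.List.pyRange 0 n 1)
  have h5 : (PySem.List.pyRange 0 n 1 ×ˢ PySem.List.pyRange 0 n 1).length =
      n.toNat * n.toNat := by
    rw [List.length_product]
    simp [PySem.List.length_pyRange_one]
  omega

theorem B_char (n : Int) (maze : List (List Int)) (mx my : List Int) (x y : Int)
    (s : List (List Int)) (hne : ¬(x = n - 1 ∧ y = n - 1)) :
    RatMaze_alt n maze mx my x y s = true ↔ ReachT n maze mx my s (x, y) := by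
  unfold RatMaze_alt
  rw [if_neg hne]
  simp only [decide_eq_true_eq]
  have hG0 : GoodB n maze mx my s (x, y) [(x, y)] [(x, y)] := by
    refine ⟨by simp, ?_, by simp, ?_⟩
    · intro q hq; simp at hq; exact Or.inl hq
    · intro p hp hnp
      simp at hp
      exact absurd (by simp [hp]) hnp
  have hD0 : DistB n maze mx my s (x, y) 0 [(x, y)] := by
    intro q l hl hlen
    have hl0 : l = [] := List.eq_nil_of_length_eq_zero (by omega)
    subst hl0
    have : q = (x, y) := hl.2.2.symm
    simp [this]
  constructor
  · intro hmem
    rcases bLoop_sound n maze mx my s (x, y) _ _ _ hG0 _ hmem with he | ⟨_, l, hp⟩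
    · exfalso
      rw [Prod.ext_iff] at he
      exact hne ⟨he.1.symm, he.2.symm⟩
    · exact ⟨l, hp⟩
  · rintro ⟨l, hp⟩
    obtain ⟨l', hp', hnd', _⟩ := path_shorten n maze mx my s l (x, y) _ hp
    have hndl : l'.Nodup := (List.nodup_cons.mp hnd').2
    have hshort := nodup_path_short n maze mx my s (x, y) _ l' hp' hndl
    have hbound : l'.length ≤ 0 + (PySem.List.pyRange 0 (n * n + 1) 1).length := by
      rw [PySem.List.length_pyRange_one]
      by_cases hn : 0 ≤ n
      · have h2 : ((n.toNat * n.toNat : Nat) : Int) = n * n := by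
          push_cast [Int.toNat_of_nonneg hn]; ring
        omega
      · have h0 : n.toNat = 0 := by omega
        rw [h0] at hshort
        simp only [Nat.mul_zero, Nat.le_zero] at hshort
        simp [hshort]
    exact bLoop_complete n maze mx my s (x, y) _ 0 _ _ hG0 hD0 _ l' hp' hbound

-- ===== VERDICT (by name: the statement is the Claim_ definition above) =====
theorem RatMaze_spec : Claim_equal_RatMaze := by
  intro n maze mx my x y s _hDom hPre
  unfold Spec_RatMaze
  by_cases ht : x = n - 1 ∧ y = n - 1
  · have hA : RatMaze n maze mx my x y s = true := by
      simp [RatMaze, ratAux, ht]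
    have hB : RatMaze_alt n maze mx my x y s = true := by
      simp [RatMaze_alt, ht]
    rw [hA, hB]
  · have hOK : RowsOK n s := by
      rcases hPre with h | h | h
      · exact absurd h ht
      · exact ⟨by omega, fun i hi => by omega⟩
      · exact ⟨h.2.1, fun i hi => (h.2.2.2.2 i hi).2⟩
    rw [Bool.eq_iff_iff, A_char n maze mx my x y s hOK, B_char n maze mx my x y s ht]
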